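-- pv_equiv track=rewrite | github.com/farahabadi/Android-Forensic-Framework | analyze/modules/org_telegram_messenger_web.py | getlatlong
-- ===== SOURCE A (Python) =====
-- def getlatlong(coords):
--     lat=0
--     long=0
--     for offset, value in coords:
--         if (offset == 60):
--             long = value
--         if (offset == 68):
--             lat = value
--     return (lat, long)
-- ===== SOURCE B (Python) =====
-- def getlatlong(coords):
--     lat = 0
--     long = 0
--     need_lat = True
--     need_long = True
--     for offset, value in reversed(coords):
--         if need_lat and offset == 68:
--             lat = value
--             need_lat = False
--         elif need_long and offset == 60:
--             long = value
--             need_long = False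
--         if not (need_lat or need_long):
--             break
--     return (lat, long)
-- ===== Notes on version B (the rewrite author's own statement) =====
-- stated objective: alternative
-- what changed: Scans the list back-to-front taking the FIRST match for each offset (equal to the forward scan's last overwrite) and stops early once both lat and long are found, instead of A's forward branch-and-overwrite scan over every element.
import Mathlib
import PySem

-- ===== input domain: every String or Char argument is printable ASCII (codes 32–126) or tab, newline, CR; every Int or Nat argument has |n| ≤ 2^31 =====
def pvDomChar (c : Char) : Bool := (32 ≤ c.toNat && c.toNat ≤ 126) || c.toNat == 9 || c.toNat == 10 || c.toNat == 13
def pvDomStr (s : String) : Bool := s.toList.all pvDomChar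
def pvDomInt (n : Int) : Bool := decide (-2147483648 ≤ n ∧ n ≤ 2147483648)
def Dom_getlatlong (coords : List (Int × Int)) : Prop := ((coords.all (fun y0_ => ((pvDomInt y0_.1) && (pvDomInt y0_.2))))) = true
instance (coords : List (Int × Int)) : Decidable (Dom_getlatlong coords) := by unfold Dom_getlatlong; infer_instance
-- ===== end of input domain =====

-- B scans back-to-front, keeping the first match per offset and stopping once both are found, instead of A's forward overwrite scan (alternative; same cost).

-- ===== PORT A =====
def getlatlong (coords : List (Int × Int)) : Int × Int :=
  -- state (lat, long), initialized (0, 0); per (offset, value): if offset == 60 set long; if offset == 68 set lat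
  coords.foldl (fun (s : Int × Int) p =>
    let s1 := if p.1 == 60 then (s.1, p.2) else s
    if p.1 == 68 then (p.2, s1.2) else s1) (0, 0)

-- ===== PORT B =====
-- the reversed-iteration loop with early break, as structural recursion on the reversed list
def getlatlongAltGo : List (Int × Int) → Int → Int → Bool → Bool → Int × Int
  | [], lat, long, _, _ => (lat, long)
  | p :: rest, lat, long, needLat, needLong =>
    let st :=
      if needLat && p.1 == 68 then (p.2, long, false, needLong)
      else if needLong && p.1 == 60 then (lat, p.2, needLat, false)
      else (lat, long, needLat, needLong)
    if !(st.2.2.1 || st.2.2.2) then (st.1, st.2.1)  -- break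
    else getlatlongAltGo rest st.1 st.2.1 st.2.2.1 st.2.2.2

def getlatlong_alt (coords : List (Int × Int)) : Int × Int :=
  getlatlongAltGo coords.reverse 0 0 true true

-- ===== PRECONDITION & SPEC =====
def Spec_getlatlong (coords : List (Int × Int)) (out : Int × Int) : Prop := out = getlatlong_alt coords
instance (coords : List (Int × Int)) (out : Int × Int) : Decidable (Spec_getlatlong coords out) := by unfold Spec_getlatlong; infer_instance

-- ===== CLAIM (what is proved, stated in full; the proofs are below) =====
def Claim_equal_getlatlong : Prop := ∀ (coords : List (Int × Int)), Dom_getlatlong coords → Spec_getlatlong coords (getlatlong coords)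

-- ===== LEMMAS AND PROOFS =====

-- first value paired with key k in l, default d
def pvFirstD (k : Int) (l : List (Int × Int)) (d : Int) : Int :=
  match l.find? (fun p => p.1 == k) with
  | some p => p.2
  | none => d

theorem pvFirstD_cons (k : Int) (p : Int × Int) (l : List (Int × Int)) (d : Int) :
    pvFirstD k (p :: l) d = if p.1 == k then p.2 else pvFirstD k l d := by
  simp only [pvFirstD, List.find?]
  by_cases h : p.1 == k <;> simp [h]

-- B's loop computes, for each flag still needed, the first match in the remaining (reversed) list.
theorem getlatlongAltGo_eq (l : List (Int × Int)) (lat long : Int) (nlat nlong : Bool) :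
    getlatlongAltGo l lat long nlat nlong =
      ((if nlat then pvFirstD 68 l lat else lat),
       (if nlong then pvFirstD 60 l long else long)) := by
  induction l generalizing lat long nlat nlong with
  | nil => cases nlat <;> cases nlong <;> simp [getlatlongAltGo, pvFirstD]
  | cons p rest ih =>
    simp only [getlatlongAltGo, pvFirstD_cons]
    cases nlat <;> cases nlong <;>
      by_cases h68 : p.1 = 68 <;> by_cases h60 : p.1 = 60 <;>
        simp [h68, h60, ih]

-- A's forward scan started from (a, b) yields the LAST matches, i.e. the first matches of the reversed list.
theorem getlatlong_fold_eq (l : List (Int × Int)) (a b : Int) :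
    l.foldl (fun (s : Int × Int) p =>
      let s1 := if p.1 == 60 then (s.1, p.2) else s
      if p.1 == 68 then (p.2, s1.2) else s1) (a, b)
    = (pvFirstD 68 l.reverse a, pvFirstD 60 l.reverse b) := by
  induction l generalizing a b with
  | nil => simp [pvFirstD]
  | cons p rest ih =>
    simp only [List.foldl_cons, List.reverse_cons]
    have hfind (k : Int) (d : Int) :
        pvFirstD k (rest.reverse ++ [p]) d = pvFirstD k rest.reverse (if p.1 == k then p.2 else d) := by
      simp only [pvFirstD, List.find?_append]
      cases hf : rest.reverse.find? (fun q => q.1 == k) with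
      | some q => simp
      | none =>
        by_cases h : p.1 == k <;> simp [List.find?, h]
    rw [hfind 68 a, hfind 60 b, ← ih]
    by_cases h68 : p.1 = 68 <;> by_cases h60 : p.1 = 60 <;> simp [h68, h60]

-- ===== VERDICT (by name: the statement is the Claim_ definition above) =====
theorem getlatlong_spec : Claim_equal_getlatlong := by
  intro coords _
  unfold Spec_getlatlong getlatlong getlatlong_alt
  rw [getlatlong_fold_eq, getlatlongAltGo_eq]
  simp
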